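-- pv_equiv track=rewrite | github.com/semyonvlasov/rep_lipsync_training | training/scripts/export_faceclip_batch.py | compute_segment_ranges
-- ===== SOURCE A (Python) =====
-- def compute_segment_ranges(total_frames: int, max_frames: int) -> list[tuple[int, int]]:
--     total_frames = int(total_frames)
--     max_frames = max(1, int(max_frames))
--     if total_frames <= 0:
--         return []
--
--     ranges: list[tuple[int, int]] = []
--     start = 0
--     remaining = total_frames
--     while remaining > 0:
--         if remaining <= max_frames:
--             ranges.append((start, start + remaining))
--             break
--         if remaining <= (2 * max_frames):
--             first = remaining // 2
--             second = remaining - first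
--             ranges.append((start, start + first))
--             ranges.append((start + first, start + first + second))
--             break
--         ranges.append((start, start + max_frames))
--         start += max_frames
--         remaining = total_frames - start
--     return ranges
-- ===== SOURCE B (Python) =====
-- def compute_segment_ranges(total_frames: int, max_frames: int) -> list[tuple[int, int]]:
--     total_frames = int(total_frames)
--     m = max(1, int(max_frames))
--     if total_frames <= 0:
--         return []
--     # number of full m-sized chunks, computed arithmetically
--     k = 0 if total_frames <= 2 * m else (total_frames - m - 1) // m
--     r = total_frames - k * m
--     sizes = [m] * k + ([r] if r <= m else [r // 2, r - r // 2])
--     out = []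
--     start = 0
--     for sz in sizes:
--         out.append((start, start + sz))
--         start += sz
--     return out
-- ===== Notes on version B (the rewrite author's own statement) =====
-- stated objective: alternative
-- what changed: Replaces A's while-loop with remaining/start state by an arithmetic closed-form chunk count k=(total-m-1)//m, an explicit list of segment sizes, and one prefix-sum pass emitting (start,start+size) pairs.
import Mathlib
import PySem

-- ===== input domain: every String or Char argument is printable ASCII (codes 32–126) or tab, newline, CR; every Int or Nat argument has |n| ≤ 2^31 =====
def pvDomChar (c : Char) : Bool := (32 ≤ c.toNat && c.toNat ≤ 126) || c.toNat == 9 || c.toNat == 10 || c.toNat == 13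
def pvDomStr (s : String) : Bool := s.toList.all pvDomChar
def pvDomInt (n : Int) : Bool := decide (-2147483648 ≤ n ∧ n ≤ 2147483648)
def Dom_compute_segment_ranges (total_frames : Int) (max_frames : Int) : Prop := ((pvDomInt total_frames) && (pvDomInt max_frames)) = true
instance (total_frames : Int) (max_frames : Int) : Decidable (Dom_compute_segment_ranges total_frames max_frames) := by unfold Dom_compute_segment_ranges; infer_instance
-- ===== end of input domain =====

-- B replaces A's while-loop by a closed-form chunk count, an explicit size list and one prefix-sum pass (alternative decomposition, same cost).

-- ===== PORT A =====
-- A's while-loop: state (start, remaining); termination needs 1 ≤ m, which A guarantees via max(1, ·).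
def srLoop (m : Int) (hm : 1 ≤ m) (start remaining : Int) : List (Int × Int) :=
  if 0 < remaining then
    if remaining ≤ m then
      [(start, start + remaining)]
    else if remaining ≤ 2 * m then
      let first := PySem.Int.floordiv remaining 2
      let second := remaining - first
      [(start, start + first), (start + first, start + first + second)]
    else
      (start, start + m) :: srLoop m hm (start + m) (remaining - m)
  else []
termination_by remaining.toNat
decreasing_by omega

def compute_segment_ranges (total_frames : Int) (max_frames : Int) : List (Int × Int) :=
  let m := max 1 max_frames
  if total_frames ≤ 0 then []
  else srLoop m (le_max_left 1 max_frames) 0 total_frames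

-- ===== PORT B =====
def compute_segment_ranges_alt (total_frames : Int) (max_frames : Int) : List (Int × Int) :=
  let m := max 1 max_frames
  if total_frames ≤ 0 then []
  else
    let k : Int := if total_frames ≤ 2 * m then 0 else PySem.Int.floordiv (total_frames - m - 1) m
    let r : Int := total_frames - k * m
    let sizes : List Int :=
      List.replicate k.toNat m ++
        (if r ≤ m then [r] else [PySem.Int.floordiv r 2, r - PySem.Int.floordiv r 2])
    (sizes.foldl (fun (acc : List (Int × Int) × Int) sz =>
        (acc.1 ++ [(acc.2, acc.2 + sz)], acc.2 + sz)) ([], 0)).1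

-- ===== PRECONDITION & SPEC =====
def Spec_compute_segment_ranges (total_frames : Int) (max_frames : Int) (out : List (Int × Int)) : Prop := out = compute_segment_ranges_alt total_frames max_frames
instance (total_frames : Int) (max_frames : Int) (out : List (Int × Int)) : Decidable (Spec_compute_segment_ranges total_frames max_frames out) := by unfold Spec_compute_segment_ranges; infer_instance

-- ===== CLAIM (what is proved, stated in full; the proofs are below) =====
def Claim_equal_compute_segment_ranges : Prop := ∀ (total_frames : Int) (max_frames : Int), Dom_compute_segment_ranges total_frames max_frames → Spec_compute_segment_ranges total_frames max_frames (compute_segment_ranges total_frames max_frames)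

-- ===== LEMMAS AND PROOFS =====

-- proof-side view of B's single pass: emit (start, start+size) with a running start
def srEmit (start : Int) : List Int → List (Int × Int)
  | [] => []
  | a :: t => (start, start + a) :: srEmit (start + a) t

theorem srEmit_foldl (sizes : List Int) (out : List (Int × Int)) (s : Int) :
    (sizes.foldl (fun (acc : List (Int × Int) × Int) sz =>
        (acc.1 ++ [(acc.2, acc.2 + sz)], acc.2 + sz)) (out, s)).1 = out ++ srEmit s sizes := by
  induction sizes generalizing out s with
  | nil => simp [srEmit]
  | cons a t ih => simp [srEmit, List.foldl_cons, ih, List.append_assoc]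

-- closed-form chunk count and tail sizes (B's k, r, sizes)
def srK (m t : Int) : Int := if t ≤ 2 * m then 0 else PySem.Int.floordiv (t - m - 1) m

def srTail (m r : Int) : List Int :=
  if r ≤ m then [r] else [PySem.Int.floordiv r 2, r - PySem.Int.floordiv r 2]

theorem srK_nonneg (m t : Int) (hm : 1 ≤ m) : 0 ≤ srK m t := by
  unfold srK
  split
  · omega
  · rw [PySem.Int.floordiv_eq_ediv_of_pos (by omega)]
    exact Int.ediv_nonneg (by omega) (by omega)

theorem srK_step (m t : Int) (hm : 1 ≤ m) (ht : 2 * m < t) :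
    srK m t = srK m (t - m) + 1 := by
  unfold srK
  rw [if_neg (by omega)]
  rw [PySem.Int.floordiv_eq_ediv_of_pos (by omega)]
  by_cases h : t - m ≤ 2 * m
  · rw [if_pos h]
    have h1 : t - m - 1 = (t - 2 * m - 1) + 1 * m := by ring
    rw [h1, Int.add_mul_ediv_right _ _ (by omega : m ≠ 0)]
    rw [Int.ediv_eq_zero_of_lt (by omega) (by omega)]
  · rw [if_neg h, PySem.Int.floordiv_eq_ediv_of_pos (by omega)]
    have h1 : t - m - 1 = (t - m - m - 1) + 1 * m := by ring
    rw [h1, Int.add_mul_ediv_right _ _ (by omega : m ≠ 0)]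

theorem srLoop_eq (m : Int) (hm : 1 ≤ m) (start remaining : Int) (hr : 0 < remaining) :
    srLoop m hm start remaining =
      srEmit start (List.replicate (srK m remaining).toNat m ++
        srTail m (remaining - srK m remaining * m)) := by
  rw [srLoop]
  rw [if_pos hr]
  by_cases h1 : remaining ≤ m
  · have hk : srK m remaining = 0 := by unfold srK; rw [if_pos (by omega)]
    rw [if_pos h1, hk]
    have hz : remaining - 0 * m = remaining := by ring
    rw [hz, srTail, if_pos h1]
    simp [srEmit]
  · rw [if_neg h1]
    by_cases h2 : remaining ≤ 2 * m
    · have hk : srK m remaining = 0 := by unfold srK; rw [if_pos h2]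
      rw [if_pos h2, hk]
      have hz : remaining - 0 * m = remaining := by ring
      rw [hz, srTail, if_neg h1]
      simp [srEmit]
    · rw [if_neg h2]
      have ih := srLoop_eq m hm (start + m) (remaining - m) (by omega)
      rw [ih]
      have hk := srK_step m remaining hm (by omega)
      have hk0 : 0 ≤ srK m (remaining - m) := srK_nonneg m (remaining - m) hm
      rw [hk]
      have htn : (srK m (remaining - m) + 1).toNat = (srK m (remaining - m)).toNat + 1 := by omega
      rw [htn, List.replicate_succ]
      have hr' : remaining - (srK m (remaining - m) + 1) * m = remaining - m - srK m (remaining - m) * m := by ring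
      rw [hr']
      simp [srEmit]
termination_by remaining.toNat
decreasing_by omega

-- ===== VERDICT (by name: the statement is the Claim_ definition above) =====
theorem compute_segment_ranges_spec : Claim_equal_compute_segment_ranges := by
  intro t mf _
  unfold Spec_compute_segment_ranges compute_segment_ranges compute_segment_ranges_alt
  by_cases h : t ≤ 0
  · simp [h]
  · rw [if_neg h, if_neg h]
    rw [srLoop_eq _ _ 0 t (by omega)]
    rw [srEmit_foldl]
    simp [srK, srTail]
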